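-- pv_equiv track=rewrite | github.com/michellehma/access-control-benchmark | driver.py | abacFix
-- ===== SOURCE A (Python) =====
-- def abacFix(conditions, query, num):
--     queryList = query.split(" ")
--
--     #adds the conditions to the query after the word "where"
--     if num == 6 or num == 7 or num == 8 or num == 21:
--         for word in range(len(queryList)):
--             if queryList[word] == "where":
--                 for condition in conditions:
--                     if condition:
--                         queryList.insert(word+1, condition + " and")
--                 break
--     #adds the conditions to the query before the word "group"
--     elif num == 12:
--         count = 0
--         for word in range(len(queryList)):
--             if "%" in queryList[word]:
--                 for condition in conditions:
--                     if condition: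
--                         if count == 0:
--                             queryList.insert(word+1, "where " + condition)
--                         else:
--                             queryList.insert(word+1, "and " + condition)
--                         count += 1
--                 break
--     #adds the conditions to the query after the word "where" for both parts of the query
--     elif num == 14:
--         count = 0
--         for word in range(len(queryList)):
--             if queryList[word] == "where" and count == 0:
--                 for condition in conditions:
--                     if condition and condition[0] == 'l':
--                         queryList.insert(word + 1, condition + " and")
--                 count += 1
--             elif queryList[word] == "where" and count == 1:
--                 for condition in conditions:
--                     if condition and condition[0] == 's':
--                         queryList.insert(word + 1, condition + " and")
--                 count += 1
--     #adds the conditions to the query after the word "where"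
--     else:
--         for word in range(len(queryList)):
--             if queryList[word] == "where":
--                 for condition in conditions:
--                     if condition:
--                         queryList.insert(word + 1, condition + " and")
--                 break
--
--     #returns the modified query
--     query = " ".join(queryList)
--     return query
-- ===== SOURCE B (Python) =====
-- def abacFix(conditions, query, num):
--     # Single forward pass over the tokens, emitting each token followed by its
--     # (reversed) condition segment; no index arithmetic, no in-place inserts.
--     # Intended difference vs A: in the num==14 branch A's precomputed range()
--     # misses the second "where" once the first insertion shifts it past the
--     # original token count; B always handles both "where" parts.
--     toks = query.split(" ")
--     out = []
--     if num == 12: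
--         done = False
--         for t in toks:
--             out.append(t)
--             if not done and "%" in t:
--                 nonempty = [c for c in conditions if c]
--                 labeled = [("where " if i == 0 else "and ") + c
--                            for i, c in enumerate(nonempty)]
--                 out.extend(reversed(labeled))
--                 done = True
--     elif num == 14:
--         count = 0
--         for t in toks:
--             out.append(t)
--             if t == "where" and count == 0:
--                 out.extend(reversed([c + " and" for c in conditions
--                                      if c and c[0] == 'l']))
--                 count = 1
--             elif t == "where" and count == 1:
--                 out.extend(reversed([c + " and" for c in conditions
--                                      if c and c[0] == 's']))
--                 count = 2
--     else:
--         done = False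
--         for t in toks:
--             out.append(t)
--             if not done and t == "where":
--                 out.extend(reversed([c + " and" for c in conditions if c]))
--                 done = True
--     return " ".join(out)
-- ===== Notes on version B (the rewrite author's own statement) =====
-- stated objective: alternative
-- what changed: Replaces A's index-scan over a precomputed range() with repeated mid-list insert() calls by a single forward pass that emits each token followed by its precomputed reversed condition segment, then joins once.
-- intended difference: For num==14 queries whose second 'where' token, shifted by the inserted l-conditions, lands at or beyond the original token count, A silently never adds the s-conditions after the second 'where' (its range() was computed before the inserts), while B adds them there as the function's own comment ('for both parts of the query') intends. — e.g. on abacFix(["lx", "sx"], "a where where", 14): A returns "a where lx and where", B returns "a where lx and where sx and"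
import Mathlib
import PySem

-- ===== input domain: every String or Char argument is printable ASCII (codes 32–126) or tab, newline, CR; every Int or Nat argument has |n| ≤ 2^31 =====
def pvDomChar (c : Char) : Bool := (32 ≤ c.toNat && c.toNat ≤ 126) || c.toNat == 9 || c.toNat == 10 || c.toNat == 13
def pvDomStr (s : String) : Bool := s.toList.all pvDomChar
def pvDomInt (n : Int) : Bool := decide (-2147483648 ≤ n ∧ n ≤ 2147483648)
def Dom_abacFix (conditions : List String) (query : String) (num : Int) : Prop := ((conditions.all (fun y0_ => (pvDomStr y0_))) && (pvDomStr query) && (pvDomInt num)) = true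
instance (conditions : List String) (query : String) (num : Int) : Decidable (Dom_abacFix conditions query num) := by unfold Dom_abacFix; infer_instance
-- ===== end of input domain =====

-- B is a single emit-pass over the tokens instead of A's range(len)-indexed scan with repeated
-- mid-list inserts; A's num==14 branch misses the second "where" when the first
-- insertion shifts it past the precomputed range — B handles it, stated as the intended difference D_.

-- ===== PORT A =====
-- 'if condition:' filter ('and condition[0]==ch' in the num==14 branch) + 'queryList.insert(word+1, condition + " and")' loop
def pvInsFilterLoop (pred : String → Bool) (conditions : List String) (p : Nat)
    (ql : List String) : List String :=
  conditions.foldl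
    (fun ql c => if pred c then PySem.List.insert ql (p : Int) (c ++ " and") else ql) ql

-- num==12 insert loop: counts the inserted conditions to label the first 'where ', the rest 'and '
def pvIns12Loop (conditions : List String) (p : Nat) (ql : List String) : List String :=
  (conditions.foldl
    (fun (s : List String × Nat) c =>
      if c = "" then s
      else (PySem.List.insert s.1 (p : Int) ((if s.2 = 0 then "where " else "and ") ++ c), s.2 + 1))
    (ql, 0)).1

-- 'for word in range(len(queryList)): if <test>(queryList[word]): <insert loop>; break'
def pvScanBreakAux (p : String → Bool) (ins : Nat → List String → List String)
    (ql : List String) : Nat → Nat → List String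
  | 0, _ => ql
  | m + 1, j =>
    if p (PySem.List.pyGetD ql (j : Int) "") then ins (j + 1) ql
    else pvScanBreakAux p ins ql m (j + 1)

def pvScanBreakA (p : String → Bool) (ins : Nat → List String → List String)
    (ql : List String) (n j : Nat) : List String :=
  pvScanBreakAux p ins ql (n - j) j

def pvPredL (c : String) : Bool := !(c == "") && (PySem.Str.pyGet? c 0 == some 'l')
def pvPredS (c : String) : Bool := !(c == "") && (PySem.Str.pyGet? c 0 == some 's')
def pvPredNE (c : String) : Bool := !(c == "")

-- num==14 loop: no break, count state, list grows while the range keeps the ORIGINAL length n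
def pvLoop14Aux (conditions : List String) : Nat → Nat → Nat → List String → List String
  | 0, _, _, ql => ql
  | m + 1, j, count, ql =>
    if PySem.List.pyGetD ql (j : Int) "" = "where" ∧ count = 0 then
      pvLoop14Aux conditions m (j + 1) 1 (pvInsFilterLoop pvPredL conditions (j + 1) ql)
    else if PySem.List.pyGetD ql (j : Int) "" = "where" ∧ count = 1 then
      pvLoop14Aux conditions m (j + 1) 2 (pvInsFilterLoop pvPredS conditions (j + 1) ql)
    else pvLoop14Aux conditions m (j + 1) count ql

def pvLoop14A (conditions : List String) (ql : List String) (n j count : Nat) : List String :=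
  pvLoop14Aux conditions (n - j) j count ql

def abacFix (conditions : List String) (query : String) (num : Int) : String :=
  let queryList := ((PySem.Str.split? query " ").getD [])
  let queryList2 :=
    if num = 6 ∨ num = 7 ∨ num = 8 ∨ num = 21 then
      pvScanBreakA (fun t => t == "where") (pvInsFilterLoop pvPredNE conditions)
        queryList queryList.length 0
    else if num = 12 then
      pvScanBreakA (fun t => PySem.Str.isIn "%" t) (pvIns12Loop conditions)
        queryList queryList.length 0
    else if num = 14 then
      pvLoop14A conditions queryList queryList.length 0 0
    else
      pvScanBreakA (fun t => t == "where") (pvInsFilterLoop pvPredNE conditions)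
        queryList queryList.length 0
  PySem.Str.join " " queryList2

-- ===== PORT B =====
-- '[c + " and" for c in conditions if c (and c[0]==ch)][::-1]'
def pvSegOf (pred : String → Bool) (conditions : List String) : List String :=
  ((conditions.filter pred).map (fun c => c ++ " and")).reverse

-- num==12 segment: enumerate the non-empty conditions, label the first 'where ', the rest 'and ', reverse
def pvSeg12 (conditions : List String) : List String :=
  ((PySem.List.enumerate (conditions.filter pvPredNE) 0).map
    (fun ic => (if ic.1 = 0 then "where " else "and ") ++ ic.2)).reverse

-- loop body: out.append(t); if first match: out.extend(segment)
def pvStepB (p : String → Bool) (seg : List String) (s : List String × Bool)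
    (t : String) : List String × Bool :=
  let o := s.1 ++ [t]
  if !s.2 && p t then (o ++ seg, true) else (o, s.2)

def pvStepB14 (segL segS : List String) (s : List String × Nat) (t : String) :
    List String × Nat :=
  let o := s.1 ++ [t]
  if t = "where" ∧ s.2 = 0 then (o ++ segL, 1)
  else if t = "where" ∧ s.2 = 1 then (o ++ segS, 2)
  else (o, s.2)

def abacFix_alt (conditions : List String) (query : String) (num : Int) : String :=
  let toks := ((PySem.Str.split? query " ").getD [])
  let out :=
    if num = 12 then
      (toks.foldl (pvStepB (fun t => PySem.Str.isIn "%" t) (pvSeg12 conditions)) ([], false)).1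
    else if num = 14 then
      (toks.foldl (pvStepB14 (pvSegOf pvPredL conditions) (pvSegOf pvPredS conditions)) ([], 0)).1
    else
      (toks.foldl (pvStepB (fun t => t == "where") (pvSegOf pvPredNE conditions)) ([], false)).1
  PySem.Str.join " " out

-- ===== PRECONDITION & SPEC =====
-- index of the second token equal to "where" (input inspection only; used by D_ below)
def pvSndWhere (toks : List String) : Option Nat :=
  match List.findIdx? (fun t => t == "where") toks with
  | none => none
  | some w1 => (List.findIdx? (fun t => t == "where") (toks.drop (w1 + 1))).map (fun r => r + w1 + 1)

-- For num==14 queries whose second "where" token, shifted by the inserted l-conditions, lands at or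
-- beyond the original token count, A silently never adds the s-conditions after the second "where"
-- (its range() was computed before the inserts), while B adds them there, as the function's own
-- comment ("for both parts of the query") intends.
def D_abacFix (conditions : List String) (query : String) (num : Int) : Prop :=
  num = 14 ∧
  1 ≤ (conditions.filter (fun c => c ≠ "" ∧ c.toList.head? = some 's')).length ∧
  (pvSndWhere (((PySem.Str.split? query " ").getD []))).isSome = true ∧
  (((PySem.Str.split? query " ").getD [])).length ≤
    (pvSndWhere (((PySem.Str.split? query " ").getD []))).getD 0 +
      (conditions.filter (fun c => c ≠ "" ∧ c.toList.head? = some 'l')).length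

instance (conditions : List String) (query : String) (num : Int) :
    Decidable (D_abacFix conditions query num) := by unfold D_abacFix; infer_instance

def Spec_abacFix (conditions : List String) (query : String) (num : Int) (out : String) : Prop :=
  ¬ D_abacFix conditions query num → out = abacFix_alt conditions query num
instance (conditions : List String) (query : String) (num : Int) (out : String) :
    Decidable (Spec_abacFix conditions query num out) := by unfold Spec_abacFix; infer_instance

def pvDiffWitness_abacFix : List String × String × Int := (["lx", "sx"], "a where where", 14)
def pvDiffWitnessOut_abacFix : String × String :=
  ("a where lx and where", "a where lx and where sx and")

-- ===== CLAIM (what is proved, stated in full; the proofs are below) =====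
def Claim_unchanged_abacFix : Prop := ∀ (conditions : List String) (query : String) (num : Int), Dom_abacFix conditions query num → Spec_abacFix conditions query num (abacFix conditions query num)
def Claim_exact_abacFix : Prop := ∀ (conditions : List String) (query : String) (num : Int), Dom_abacFix conditions query num → D_abacFix conditions query num → abacFix conditions query num ≠ abacFix_alt conditions query num
def Claim_changed_abacFix : Prop := Dom_abacFix (pvDiffWitness_abacFix.1) (pvDiffWitness_abacFix.2.1) (pvDiffWitness_abacFix.2.2) ∧ D_abacFix (pvDiffWitness_abacFix.1) (pvDiffWitness_abacFix.2.1) (pvDiffWitness_abacFix.2.2) ∧ abacFix (pvDiffWitness_abacFix.1) (pvDiffWitness_abacFix.2.1) (pvDiffWitness_abacFix.2.2) = pvDiffWitnessOut_abacFix.1 ∧ abacFix_alt (pvDiffWitness_abacFix.1) (pvDiffWitness_abacFix.2.1) (pvDiffWitness_abacFix.2.2) = pvDiffWitnessOut_abacFix.2 ∧ pvDiffWitnessOut_abacFix.1 ≠ pvDiffWitnessOut_abacFix.2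

-- ===== LEMMAS AND PROOFS =====

-- the single-break scan/insert behaviour, as a structural function on the token list
def pvSpec1 (seg : List String) (p : String → Bool) : List String → List String
  | [] => []
  | t :: ts => if p t then t :: (seg ++ ts) else t :: pvSpec1 seg p ts

-- num==14 emit-pass behaviour (B) and its budgeted twin (A's precomputed-range loop)
def pvSpec14 (segL segS : List String) : Nat → List String → List String
  | _, [] => []
  | cnt, t :: ts =>
      if t = "where" ∧ cnt = 0 then t :: (segL ++ pvSpec14 segL segS 1 ts)
      else if t = "where" ∧ cnt = 1 then t :: (segS ++ pvSpec14 segL segS 2 ts)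
      else t :: pvSpec14 segL segS cnt ts

def pvCnt14 : Nat → List String → Nat
  | cnt, [] => cnt
  | cnt, t :: ts =>
      if t = "where" ∧ cnt = 0 then pvCnt14 1 ts
      else if t = "where" ∧ cnt = 1 then pvCnt14 2 ts
      else pvCnt14 cnt ts

def pvGo14 (segL segS : List String) : Nat → Nat → List String → List String
  | 0, _, s => s
  | _ + 1, _, [] => []
  | m + 1, cnt, t :: ts =>
      if t = "where" ∧ cnt = 0 then t :: pvGo14 segL segS m 1 (segL ++ ts)
      else if t = "where" ∧ cnt = 1 then t :: pvGo14 segL segS m 2 (segS ++ ts)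
      else t :: pvGo14 segL segS m cnt ts

def pvLabFrom : Nat → List String → List String
  | _, [] => []
  | k, c :: cs => ((if k = 0 then "where " else "and ") ++ c) :: pvLabFrom (k + 1) cs

theorem pvAppend_and_ne_where (c : String) : c ++ " and" ≠ "where" := by
  intro h
  have h2 := congrArg (fun s => s.toList.getLast?) h
  simp [String.toList_append, List.getLast?_append] at h2

theorem pvSeg_ne_where (pred : String → Bool) (conditions : List String) :
    ∀ x ∈ pvSegOf pred conditions, x ≠ "where" := by
  intro x hx
  simp [pvSegOf] at hx
  obtain ⟨c, _, rfl⟩ := hx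
  exact pvAppend_and_ne_where c

theorem pvPredS_eq (c : String) :
    pvPredS c = decide (c ≠ "" ∧ c.toList.head? = some 's') := by
  simp only [pvPredS, PySem.Str.pyGet?]
  cases hc : c.toList with
  | nil =>
    have h0 : c = "" := by
      have h1 := congrArg String.ofList hc
      simpa using h1
    subst h0
    simp
  | cons a l =>
    have hne : c ≠ "" := by
      intro h; subst h; simp at hc
    have hf : (c == "") = false := beq_eq_false_iff_ne.mpr hne
    simp [PySem.List.pyGet?, PySem.List.pyIdx?, hf, hne, beq_eq_decide]

theorem pvPredL_eq (c : String) :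
    pvPredL c = decide (c ≠ "" ∧ c.toList.head? = some 'l') := by
  simp only [pvPredL, PySem.Str.pyGet?]
  cases hc : c.toList with
  | nil =>
    have h0 : c = "" := by
      have h1 := congrArg String.ofList hc
      simpa using h1
    subst h0
    simp
  | cons a l =>
    have hne : c ≠ "" := by
      intro h; subst h; simp at hc
    have hf : (c == "") = false := beq_eq_false_iff_ne.mpr hne
    simp [PySem.List.pyGet?, PySem.List.pyIdx?, hf, hne, beq_eq_decide]

theorem pvInsFilterLoop_spec (pred : String → Bool) :
    ∀ (conditions : List String) (ql : List String) (p : Nat), p ≤ ql.length →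
      pvInsFilterLoop pred conditions p ql =
        ql.take p ++ pvSegOf pred conditions ++ ql.drop p := by
  intro conditions
  induction conditions with
  | nil => intro ql p hp; simp [pvInsFilterLoop, pvSegOf]
  | cons c cs ih =>
    intro ql p hp
    cases hc : pred c with
    | true =>
      have hins := PySem.List.insert_natCast ql p (c ++ " and") hp
      have hlen : p ≤ (PySem.List.insert ql (p : Int) (c ++ " and")).length := by
        rw [hins]; simp; omega
      have h2 := ih (PySem.List.insert ql (p : Int) (c ++ " and")) p hlen
      simp only [pvInsFilterLoop, List.foldl_cons, hc, if_pos] at h2 ⊢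
      rw [h2, hins]
      rw [List.take_left' (List.length_take_of_le (by omega)),
          List.drop_left' (List.length_take_of_le (by omega))]
      simp [pvSegOf, hc, List.append_assoc]
    | false =>
      have h2 := ih ql p hp
      simp only [pvInsFilterLoop, List.foldl_cons, hc] at h2 ⊢
      rw [if_neg (by simp), h2]
      simp [pvSegOf, hc]

theorem pvIns12_fold (conditions : List String) (p : Nat) :
    ∀ (ql : List String) (k : Nat), p ≤ ql.length →
      conditions.foldl
        (fun (s : List String × Nat) c =>
          if c = "" then s
          else (PySem.List.insert s.1 (p : Int) ((if s.2 = 0 then "where " else "and ") ++ c), s.2 + 1))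
        (ql, k) =
      (ql.take p ++ (pvLabFrom k (conditions.filter pvPredNE)).reverse ++ ql.drop p,
       k + (conditions.filter pvPredNE).length) := by
  induction conditions with
  | nil => intro ql k hp; simp [pvLabFrom]
  | cons c cs ih =>
    intro ql k hp
    by_cases hc : c = ""
    · subst hc
      simp only [List.foldl_cons, reduceIte]
      rw [ih ql k hp]
      simp [pvPredNE]
    · have hins := PySem.List.insert_natCast ql p ((if k = 0 then "where " else "and ") ++ c) hp
      simp only [List.foldl_cons, if_neg hc]
      rw [ih _ (k+1) (by rw [hins]; simp; omega), hins]
      rw [List.take_left' (List.length_take_of_le (by omega)),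
          List.drop_left' (List.length_take_of_le (by omega))]
      have hf : List.filter pvPredNE (c :: cs) = c :: List.filter pvPredNE cs := by
        simp [pvPredNE, hc]
      rw [hf]
      simp [pvLabFrom, List.append_assoc]
      omega

theorem pvLab_enum :
    ∀ (l : List String) (k : Nat),
      (PySem.List.enumerate l (k : Int)).map
        (fun ic => (if ic.1 = 0 then "where " else "and ") ++ ic.2) = pvLabFrom k l := by
  intro l
  induction l with
  | nil => intro k; simp [PySem.List.enumerate_nil, pvLabFrom]
  | cons c cs ih =>
    intro k
    rw [PySem.List.enumerate_cons]
    have hcast : ((k : Int) + 1) = ((k + 1 : Nat) : Int) := by push_cast; ring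
    simp only [List.map_cons, hcast, ih (k + 1), pvLabFrom]
    congr 1
    by_cases hk : k = 0
    · subst hk; simp
    · rw [if_neg (by exact_mod_cast hk), if_neg hk]

theorem pvSeg12_eq (conditions : List String) :
    pvSeg12 conditions = (pvLabFrom 0 (conditions.filter pvPredNE)).reverse := by
  have h := pvLab_enum (conditions.filter pvPredNE) 0
  simp only [Nat.cast_zero] at h
  unfold pvSeg12
  rw [h]

theorem pvIns12Loop_spec (conditions : List String) :
    ∀ (ql : List String) (q : Nat), q ≤ ql.length →
      pvIns12Loop conditions q ql = ql.take q ++ pvSeg12 conditions ++ ql.drop q := by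
  intro ql q hq
  unfold pvIns12Loop
  rw [pvIns12_fold conditions q ql 0 hq, pvSeg12_eq]

theorem pvScanBreakAux_spec (p : String → Bool) (ins : Nat → List String → List String)
    (seg : List String)
    (hins : ∀ (ql : List String) (q : Nat), q ≤ ql.length →
      ins q ql = ql.take q ++ seg ++ ql.drop q) :
    ∀ (m j : Nat) (ql : List String), ql.length - j = m → j ≤ ql.length →
      pvScanBreakAux p ins ql m j = ql.take j ++ pvSpec1 seg p (ql.drop j) := by
  intro m
  induction m with
  | zero =>
    intro j ql hm hj
    have : j = ql.length := by omega
    subst this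
    simp [pvScanBreakAux, pvSpec1]
  | succ m ih =>
    intro j ql hm hj
    have hjl : j < ql.length := by omega
    have hget : PySem.List.pyGetD ql (j : Int) "" = ql[j] := by
      simp [PySem.List.pyGetD_natCast, hjl]
    have hdrop := List.drop_eq_getElem_cons hjl
    have htake : List.take (j + 1) ql = List.take j ql ++ [ql[j]] := by
      rw [List.take_add_one, List.getElem?_eq_getElem hjl]; simp
    cases hpt : p ql[j] with
    | true =>
      simp only [pvScanBreakAux, hget, hpt, if_pos]
      rw [hins ql (j + 1) (by omega), hdrop]
      simp only [pvSpec1, hpt, if_pos]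
      rw [htake]; simp only [List.append_assoc, List.cons_append, List.nil_append]
    | false =>
      simp only [pvScanBreakAux, hget, hpt]
      rw [if_neg (by simp), ih (j + 1) ql (by omega) (by omega), hdrop]
      simp only [pvSpec1, hpt]
      rw [if_neg (by simp)]
      rw [htake]; simp only [List.append_assoc, List.cons_append, List.nil_append]

theorem pvFoldB_true (p : String → Bool) (seg : List String) :
    ∀ (l : List String) (acc : List String),
      l.foldl (pvStepB p seg) (acc, true) = (acc ++ l, true) := by
  intro l
  induction l with
  | nil => intro acc; simp
  | cons t ts ih => intro acc; simp [pvStepB, ih]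

theorem pvFoldB_spec (p : String → Bool) (seg : List String) :
    ∀ (l : List String) (acc : List String),
      l.foldl (pvStepB p seg) (acc, false) = (acc ++ pvSpec1 seg p l, l.any p) := by
  intro l
  induction l with
  | nil => intro acc; simp [pvSpec1]
  | cons t ts ih =>
    intro acc
    cases hpt : p t with
    | true =>
      simp only [List.foldl_cons, pvStepB, hpt, Bool.not_false, Bool.and_true, if_pos]
      rw [pvFoldB_true]
      simp [pvSpec1, hpt, List.append_assoc]
    | false =>
      simp only [List.foldl_cons, pvStepB, hpt]
      rw [if_neg (by simp), ih]
      simp [pvSpec1, hpt, List.append_assoc]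

theorem pvFoldB14_spec (segL segS : List String) :
    ∀ (l : List String) (acc : List String) (cnt : Nat),
      l.foldl (pvStepB14 segL segS) (acc, cnt) =
        (acc ++ pvSpec14 segL segS cnt l, pvCnt14 cnt l) := by
  intro l
  induction l with
  | nil => intro acc cnt; simp [pvSpec14, pvCnt14]
  | cons t ts ih =>
    intro acc cnt
    by_cases h0 : t = "where" ∧ cnt = 0
    · simp only [List.foldl_cons, pvStepB14, if_pos h0, ih, pvSpec14, pvCnt14,
        List.append_assoc, List.cons_append, List.nil_append]
    · by_cases h1 : t = "where" ∧ cnt = 1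
      · simp only [List.foldl_cons, pvStepB14, if_neg h0, if_pos h1, ih, pvSpec14, pvCnt14,
          List.cons_append, List.nil_append, List.append_assoc]
      · simp only [List.foldl_cons, pvStepB14, if_neg h0, if_neg h1, ih, pvSpec14, pvCnt14,
          List.cons_append, List.nil_append, List.append_assoc]

theorem pvLoop14Aux_spec (conditions : List String) :
    ∀ (m j cnt : Nat) (ql : List String) (n : Nat), n - j = m → j ≤ n → n ≤ ql.length →
      pvLoop14Aux conditions m j cnt ql =
        ql.take j ++
          pvGo14 (pvSegOf pvPredL conditions) (pvSegOf pvPredS conditions) m cnt (ql.drop j) := by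
  intro m
  induction m with
  | zero =>
    intro j cnt ql n hm hj hn
    have : j = n := by omega
    subst this
    simp [pvLoop14Aux, pvGo14]
  | succ m ih =>
    intro j cnt ql n hm hj hn
    have hjl : j < ql.length := by omega
    have hget : PySem.List.pyGetD ql (j : Int) "" = ql[j] := by
      simp [PySem.List.pyGetD_natCast, hjl]
    have hdrop := List.drop_eq_getElem_cons hjl
    have htake : List.take (j + 1) ql = List.take j ql ++ [ql[j]] := by
      rw [List.take_add_one, List.getElem?_eq_getElem hjl]; simp
    by_cases h0 : ql[j] = "where" ∧ cnt = 0
    · simp only [pvLoop14Aux, hget, if_pos h0]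
      have hins := pvInsFilterLoop_spec pvPredL conditions ql (j + 1) (by omega)
      have hlen : n ≤ (pvInsFilterLoop pvPredL conditions (j + 1) ql).length := by
        rw [hins]; simp [List.length_append, List.length_take_of_le (show j+1 ≤ ql.length by omega)]; omega
      rw [ih (j + 1) 1 _ n (by omega) (by omega) hlen, hins,
          List.append_assoc (List.take (j + 1) ql) (pvSegOf pvPredL conditions) (List.drop (j + 1) ql),
          List.take_left' (List.length_take_of_le (by omega)),
          List.drop_left' (List.length_take_of_le (by omega)), hdrop]
      simp only [pvGo14, if_pos h0, htake, List.append_assoc, List.cons_append, List.nil_append]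
    · by_cases h1 : ql[j] = "where" ∧ cnt = 1
      · simp only [pvLoop14Aux, hget, if_neg h0, if_pos h1]
        have hins := pvInsFilterLoop_spec pvPredS conditions ql (j + 1) (by omega)
        have hlen : n ≤ (pvInsFilterLoop pvPredS conditions (j + 1) ql).length := by
          rw [hins]; simp [List.length_append, List.length_take_of_le (show j+1 ≤ ql.length by omega)]; omega
        rw [ih (j + 1) 2 _ n (by omega) (by omega) hlen, hins,
            List.append_assoc (List.take (j + 1) ql) (pvSegOf pvPredS conditions) (List.drop (j + 1) ql),
            List.take_left' (List.length_take_of_le (by omega)),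
            List.drop_left' (List.length_take_of_le (by omega)), hdrop]
        simp only [pvGo14, if_neg h0, if_pos h1, htake, List.append_assoc, List.cons_append,
          List.nil_append]
      · simp only [pvLoop14Aux, hget, if_neg h0, if_neg h1]
        rw [ih (j + 1) cnt ql n (by omega) (by omega) hn, hdrop]
        simp only [pvGo14, if_neg h0, if_neg h1, htake, List.append_assoc, List.cons_append,
          List.nil_append]

theorem pvGo14_two (segL segS : List String) :
    ∀ (m : Nat) (s : List String), pvGo14 segL segS m 2 s = s := by
  intro m
  induction m with
  | zero => intro s; simp [pvGo14]
  | succ m ih =>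
    intro s
    cases s with
    | nil => simp [pvGo14]
    | cons t ts =>
      simp only [pvGo14]
      rw [if_neg (by simp), if_neg (by simp), ih]

theorem pvSpec14_two (segL segS : List String) :
    ∀ s : List String, pvSpec14 segL segS 2 s = s := by
  intro s
  induction s with
  | nil => simp [pvSpec14]
  | cons t ts ih => simp only [pvSpec14]; rw [if_neg (by simp), if_neg (by simp), ih]

theorem pvSpec14_segS_nil (segL : List String) :
    ∀ s : List String, pvSpec14 segL [] 1 s = s := by
  intro s
  induction s with
  | nil => simp [pvSpec14]
  | cons t ts ih =>
    by_cases h : t = "where"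
    · simp only [pvSpec14]
      rw [if_neg (by simp), if_pos (by simp [h]), pvSpec14_two]
      simp
    · simp only [pvSpec14]
      rw [if_neg (by simp [h]), if_neg (by simp [h]), ih]

theorem pvSpec14_no_where (segL segS : List String) :
    ∀ (s : List String), (∀ x ∈ s, x ≠ "where") → ∀ cnt, pvSpec14 segL segS cnt s = s := by
  intro s
  induction s with
  | nil => intro _ cnt; simp [pvSpec14]
  | cons t ts ih =>
    intro h cnt
    have ht : t ≠ "where" := h t (by simp)
    simp only [pvSpec14]
    rw [if_neg (by simp [ht]), if_neg (by simp [ht]), ih (fun x hx => h x (by simp [hx])) cnt]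

theorem pvGo14_skip (segL segS : List String) :
    ∀ (seg : List String), (∀ x ∈ seg, x ≠ "where") →
      ∀ (m cnt : Nat) (ts : List String),
        pvGo14 segL segS m cnt (seg ++ ts) = seg ++ pvGo14 segL segS (m - seg.length) cnt ts := by
  intro seg
  induction seg with
  | nil => intro _ m cnt ts; simp
  | cons c cs ih =>
    intro h m cnt ts
    have hc : c ≠ "where" := h c (by simp)
    cases m with
    | zero => simp [pvGo14]
    | succ m =>
      simp only [List.cons_append, pvGo14]
      rw [if_neg (by simp [hc]), if_neg (by simp [hc]),
        ih (fun x hx => h x (by simp [hx])) m cnt ts]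
      simp only [List.length_cons]
      rw [show m + 1 - (cs.length + 1) = m - cs.length from by omega]

theorem pvPhase1 (segL segS : List String)
    (hS : ∀ x ∈ segS, x ≠ "where") :
    ∀ (ts : List String) (b : Nat), b ≤ ts.length →
      (segS = [] ∨ ∀ r, List.findIdx? (fun t => t == "where") ts = some r → r < b) →
      pvGo14 segL segS b 1 ts = pvSpec14 segL segS 1 ts := by
  intro ts
  induction ts with
  | nil =>
    intro b hb _
    cases b <;> simp [pvGo14, pvSpec14]
  | cons t ts ih =>
    intro b hb hH
    by_cases ht : t = "where"
    · cases b with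
      | zero =>
        rcases hH with h | h
        · subst h
          simp only [pvGo14, pvSpec14]
          rw [if_neg (by simp), if_pos (by simp [ht]), pvSpec14_two]
          simp
        · exfalso
          have := h 0 (by simp [List.findIdx?_cons, ht])
          omega
      | succ b' =>
        simp only [pvGo14, pvSpec14]
        rw [if_neg (by simp), if_pos (by simp [ht]), if_neg (by simp), if_pos (by simp [ht])]
        rw [pvGo14_skip segL segS segS hS, pvGo14_two, pvSpec14_two]
    · cases b with
      | zero =>
        have hgo : pvGo14 segL segS 0 1 (t :: ts) = t :: ts := by simp [pvGo14]
        rw [hgo]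
        rcases hH with h | h
        · subst h
          rw [pvSpec14_segS_nil]
        · have hno : ∀ x ∈ t :: ts, x ≠ "where" := by
            intro x hx hxw
            subst hxw
            have hmem : List.findIdx? (fun t => t == "where") (t :: ts) ≠ none := by
              rw [Ne, List.findIdx?_eq_none_iff]
              push Not
              exact ⟨"where", hx, by simp⟩
            rcases Option.ne_none_iff_exists'.mp hmem with ⟨r, hr⟩
            have := h r hr
            omega
          rw [pvSpec14_no_where segL segS (t :: ts) hno 1]
      | succ b' =>
        simp only [pvGo14, pvSpec14]
        rw [if_neg (by simp [ht]), if_neg (by simp [ht]), if_neg (by simp [ht]),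
          if_neg (by simp [ht])]
        congr 1
        apply ih b' (by simpa using hb)
        rcases hH with h | h
        · exact Or.inl h
        · right
          intro r hr
          have := h (r + 1) (by simp [List.findIdx?_cons, ht, hr])
          omega

theorem pvPhase0 (segL segS : List String) (hL : ∀ x ∈ segL, x ≠ "where")
    (hS : ∀ x ∈ segS, x ≠ "where") :
    ∀ ts : List String,
      (segS = [] ∨ ∀ w2, pvSndWhere ts = some w2 → w2 + segL.length < ts.length) →
      pvGo14 segL segS ts.length 0 ts = pvSpec14 segL segS 0 ts := by
  intro ts
  induction ts with
  | nil => intro _; simp [pvGo14, pvSpec14]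
  | cons t ts ih =>
    intro hH
    by_cases ht : t = "where"
    · simp only [List.length_cons, pvGo14, pvSpec14]
      rw [if_pos (by simp [ht]), if_pos (by simp [ht]), pvGo14_skip segL segS segL hL]
      congr 1
      congr 1
      apply pvPhase1 segL segS hS ts (ts.length - segL.length) (by omega)
      rcases hH with h | h
      · exact Or.inl h
      · right
        intro r hr
        have hsnd : pvSndWhere (t :: ts) = some (r + 1) := by
          simp [pvSndWhere, List.findIdx?_cons, ht, hr]
        have := h (r + 1) hsnd
        simp only [List.length_cons] at this
        omega
    · simp only [List.length_cons, pvGo14, pvSpec14]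
      rw [if_neg (by simp [ht]), if_neg (by simp [ht]), if_neg (by simp [ht]),
        if_neg (by simp [ht])]
      congr 1
      apply ih
      rcases hH with h | h
      · exact Or.inl h
      · right
        intro w2 hw2
        have hfi : List.findIdx? (fun t => t == "where") (t :: ts) =
            (List.findIdx? (fun t => t == "where") ts).map (fun i => i + 1) := by
          simp [List.findIdx?_cons, ht]
        cases hw1 : List.findIdx? (fun t => t == "where") ts with
        | none => simp [pvSndWhere, hw1] at hw2
        | some w1 =>
          have hsndts : pvSndWhere ts = (List.findIdx? (fun t => t == "where")
              (ts.drop (w1 + 1))).map (fun r => r + w1 + 1) := by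
            simp [pvSndWhere, hw1]
          rw [hsndts] at hw2
          rcases Option.map_eq_some_iff.mp hw2 with ⟨r, hr, hrw⟩
          have hsndcons : pvSndWhere (t :: ts) = some (r + w1 + 2) := by
            simp only [pvSndWhere, hfi, hw1, Option.map_some]
            have hsimp : (t :: ts).drop (w1 + 1 + 1) = ts.drop (w1 + 1) := by simp
            rw [hsimp, hr]
            simp
            omega
          have := h (r + w1 + 2) hsndcons
          simp only [List.length_cons] at this
          omega

-- branch-level equalities
theorem pvBranchScan (p : String → Bool) (ins : Nat → List String → List String)
    (seg : List String)
    (hins : ∀ (ql : List String) (q : Nat), q ≤ ql.length →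
      ins q ql = ql.take q ++ seg ++ ql.drop q) (toks : List String) :
    pvScanBreakA p ins toks toks.length 0 =
      (toks.foldl (pvStepB p seg) ([], false)).1 := by
  unfold pvScanBreakA
  rw [Nat.sub_zero,
    pvScanBreakAux_spec p ins seg hins toks.length 0 toks (by omega) (by omega),
    pvFoldB_spec]
  simp

theorem pvBranch14 (conditions : List String) (toks : List String)
    (hH : pvSegOf pvPredS conditions = [] ∨
      ∀ w2, pvSndWhere toks = some w2 →
        w2 + (pvSegOf pvPredL conditions).length < toks.length) :
    pvLoop14A conditions toks toks.length 0 0 =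
      (toks.foldl (pvStepB14 (pvSegOf pvPredL conditions) (pvSegOf pvPredS conditions)) ([], 0)).1 := by
  unfold pvLoop14A
  rw [Nat.sub_zero,
    pvLoop14Aux_spec conditions toks.length 0 0 toks toks.length (by omega) (by omega) (by omega),
    pvFoldB14_spec]
  simp only [List.take_zero, List.drop_zero, List.nil_append]
  exact pvPhase0 (pvSegOf pvPredL conditions) (pvSegOf pvPredS conditions)
    (pvSeg_ne_where pvPredL conditions) (pvSeg_ne_where pvPredS conditions) toks hH

theorem pvSpec14_pass (segL segS : List String) :
    ∀ (P : List String), (∀ x ∈ P, x ≠ "where") →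
      ∀ (cnt : Nat) (ts : List String),
        pvSpec14 segL segS cnt (P ++ ts) = P ++ pvSpec14 segL segS cnt ts := by
  intro P
  induction P with
  | nil => intro _ cnt ts; simp
  | cons c cs ih =>
    intro h cnt ts
    have hc : c ≠ "where" := h c (by simp)
    simp only [List.cons_append, pvSpec14]
    rw [if_neg (by simp [hc]), if_neg (by simp [hc]), ih (fun x hx => h x (by simp [hx])) cnt ts]

theorem pvGo14_D (segL segS : List String)
    (hL : ∀ x ∈ segL, x ≠ "where")
    (P M R : List String) (hP : ∀ x ∈ P, x ≠ "where") (hM : ∀ x ∈ M, x ≠ "where")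
    (hbound : R.length + 1 ≤ segL.length) :
    pvGo14 segL segS (P ++ "where" :: (M ++ "where" :: R)).length 0
        (P ++ "where" :: (M ++ "where" :: R)) =
      P ++ "where" :: (segL ++ (M ++ "where" :: R)) := by
  have hn : (P ++ "where" :: (M ++ "where" :: R)).length
      = P.length + ((M.length + R.length + 1) + 1) := by simp; omega
  rw [hn, pvGo14_skip segL segS P hP,
    show P.length + (M.length + R.length + 1 + 1) - P.length = (M.length + R.length + 1) + 1 from by omega]
  congr 1
  have h1 : pvGo14 segL segS ((M.length + R.length + 1) + 1) 0 ("where" :: (M ++ "where" :: R))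
      = "where" :: pvGo14 segL segS (M.length + R.length + 1) 1 (segL ++ (M ++ "where" :: R)) := by
    simp [pvGo14]
  rw [h1, pvGo14_skip segL segS segL hL, pvGo14_skip segL segS M hM,
    show M.length + R.length + 1 - segL.length - M.length = 0 from by omega]
  simp [pvGo14]

theorem pvSpec14_D (segL segS : List String)
    (P M R : List String) (hP : ∀ x ∈ P, x ≠ "where") (hM : ∀ x ∈ M, x ≠ "where") :
    pvSpec14 segL segS 0 (P ++ "where" :: (M ++ "where" :: R)) =
      P ++ "where" :: (segL ++ (M ++ "where" :: (segS ++ R))) := by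
  rw [pvSpec14_pass segL segS P hP]
  congr 1
  have h1 : pvSpec14 segL segS 0 ("where" :: (M ++ "where" :: R))
      = "where" :: (segL ++ pvSpec14 segL segS 1 (M ++ "where" :: R)) := by
    simp [pvSpec14]
  have h2 : pvSpec14 segL segS 1 ("where" :: R)
      = "where" :: (segS ++ pvSpec14 segL segS 2 R) := by
    simp [pvSpec14]
  rw [h1, pvSpec14_pass segL segS M hM, h2, pvSpec14_two]

def pvMlen (l : List String) : Nat := (l.map (fun s => s.toList.length)).sum + l.length

theorem pvJoinLen : ∀ (l : List String), l ≠ [] →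
    (PySem.Str.join " " l).toList.length + 1 = pvMlen l := by
  intro l
  induction l with
  | nil => intro h; exact absurd rfl h
  | cons x rest ih =>
    intro _
    cases rest with
    | nil =>
      rw [PySem.Str.toList_join]
      simp [PySem.Chars.join_singleton, pvMlen]
    | cons y r =>
      rw [PySem.Str.toList_join]
      simp only [List.map_cons, PySem.Chars.join_cons_cons]
      have ihr := ih (by simp)
      rw [PySem.Str.toList_join] at ihr
      simp only [List.map_cons] at ihr
      simp only [List.length_append]
      simp [pvMlen] at ihr ⊢
      omega

theorem pvTightCore (segL segS : List String) (hSne : segS ≠ [])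
    (P M R : List String) :
    PySem.Str.join " " (P ++ "where" :: (segL ++ (M ++ "where" :: R))) ≠
      PySem.Str.join " " (P ++ "where" :: (segL ++ (M ++ "where" :: (segS ++ R)))) := by
  intro h
  have h1 := pvJoinLen (P ++ "where" :: (segL ++ (M ++ "where" :: R))) (by simp)
  have h2 := pvJoinLen (P ++ "where" :: (segL ++ (M ++ "where" :: (segS ++ R)))) (by simp)
  rw [h] at h1
  have hmlen := h1.symm.trans h2
  have hSlen : 1 ≤ segS.length := List.length_pos_of_ne_nil hSne
  simp [pvMlen] at hmlen
  omega

-- ===== VERDICT (by name: the statement is the Claim_ definition above) =====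
theorem abacFix_spec : Claim_unchanged_abacFix := by
  intro conditions query num _hdom
  unfold Spec_abacFix
  intro hnd
  simp only [abacFix, abacFix_alt]
  by_cases h6 : num = 6 ∨ num = 7 ∨ num = 8 ∨ num = 21
  · have h12 : ¬num = 12 := by rcases h6 with h | h | h | h <;> omega
    have h14 : ¬num = 14 := by rcases h6 with h | h | h | h <;> omega
    rw [if_pos h6, if_neg h12, if_neg h14]
    exact congrArg (PySem.Str.join " ")
      (pvBranchScan _ _ (pvSegOf pvPredNE conditions)
        (pvInsFilterLoop_spec pvPredNE conditions) _)
  · rw [if_neg h6]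
    by_cases h12 : num = 12
    · have h14 : ¬num = 14 := by omega
      rw [if_pos h12, if_pos h12]
      exact congrArg (PySem.Str.join " ")
        (pvBranchScan _ _ (pvSeg12 conditions) (pvIns12Loop_spec conditions) _)
    · rw [if_neg h12, if_neg h12]
      by_cases h14 : num = 14
      · rw [if_pos h14, if_pos h14]
        -- derive the no-missed-second-where hypothesis from ¬ D_
        have hfS : conditions.filter pvPredS =
            conditions.filter (fun c => c ≠ "" ∧ c.toList.head? = some 's') :=
          List.filter_congr (fun c _ => pvPredS_eq c)
        have hfL : conditions.filter pvPredL =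
            conditions.filter (fun c => c ≠ "" ∧ c.toList.head? = some 'l') :=
          List.filter_congr (fun c _ => pvPredL_eq c)
        have hX : ¬(1 ≤ (conditions.filter (fun c => c ≠ "" ∧ c.toList.head? = some 's')).length ∧
            (pvSndWhere ((PySem.Str.split? query " ").getD [])).isSome = true ∧
            ((PySem.Str.split? query " ").getD []).length ≤
              (pvSndWhere ((PySem.Str.split? query " ").getD [])).getD 0 +
                (conditions.filter (fun c => c ≠ "" ∧ c.toList.head? = some 'l')).length) := by
          intro hx
          exact hnd ⟨h14, hx⟩
        have hH : pvSegOf pvPredS conditions = [] ∨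
            ∀ w2, pvSndWhere ((PySem.Str.split? query " ").getD []) = some w2 →
              w2 + (pvSegOf pvPredL conditions).length <
                ((PySem.Str.split? query " ").getD []).length := by
          by_cases hk : (conditions.filter (fun c => c ≠ "" ∧ c.toList.head? = some 's')).length = 0
          · left
            have : (conditions.filter pvPredS).length = 0 := by rw [hfS]; exact hk
            have hnil : conditions.filter pvPredS = [] := List.length_eq_zero_iff.mp this
            simp [pvSegOf, hnil]
          · right
            intro w2 hw2
            have hkk : (pvSegOf pvPredL conditions).length =
                (conditions.filter (fun c => c ≠ "" ∧ c.toList.head? = some 'l')).length := by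
              simp [pvSegOf, hfL]
            rw [hkk]
            by_contra hge
            exact hX ⟨by omega, by simp [hw2], by rw [hw2]; simp at hge ⊢; omega⟩
        exact congrArg (PySem.Str.join " ") (pvBranch14 conditions _ hH)
      · rw [if_neg h14, if_neg h14]
        exact congrArg (PySem.Str.join " ")
          (pvBranchScan _ _ (pvSegOf pvPredNE conditions)
            (pvInsFilterLoop_spec pvPredNE conditions) _)

theorem abacFix_changed : Claim_changed_abacFix := by
  unfold Claim_changed_abacFix; decide

theorem abacFix_tight : Claim_exact_abacFix := by
  intro conditions query num _hdom hD
  obtain ⟨h14, hk2, hsome, hle⟩ := hD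
  have hfS : conditions.filter pvPredS =
      conditions.filter (fun c => c ≠ "" ∧ c.toList.head? = some 's') :=
    List.filter_congr (fun c _ => pvPredS_eq c)
  have hfL : conditions.filter pvPredL =
      conditions.filter (fun c => c ≠ "" ∧ c.toList.head? = some 'l') :=
    List.filter_congr (fun c _ => pvPredL_eq c)
  have hA : abacFix conditions query num = PySem.Str.join " "
      (pvGo14 (pvSegOf pvPredL conditions) (pvSegOf pvPredS conditions)
        ((PySem.Str.split? query " ").getD []).length 0 ((PySem.Str.split? query " ").getD [])) := by
    simp only [abacFix]
    rw [if_neg (by omega), if_neg (by omega), if_pos h14]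
    unfold pvLoop14A
    rw [Nat.sub_zero,
      pvLoop14Aux_spec conditions ((PySem.Str.split? query " ").getD []).length 0 0
        ((PySem.Str.split? query " ").getD []) ((PySem.Str.split? query " ").getD []).length
        (by omega) (by omega) (by omega)]
    simp
  have hB : abacFix_alt conditions query num = PySem.Str.join " "
      (pvSpec14 (pvSegOf pvPredL conditions) (pvSegOf pvPredS conditions) 0
        ((PySem.Str.split? query " ").getD [])) := by
    simp only [abacFix_alt]
    rw [if_neg (by omega), if_pos h14, pvFoldB14_spec]
    simp
  rw [hA, hB]
  cases hw1 : List.findIdx? (fun t => t == "where") ((PySem.Str.split? query " ").getD []) with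
  | none => simp [pvSndWhere, hw1] at hsome
  | some w1 =>
    cases hw2 : List.findIdx? (fun t => t == "where")
        (((PySem.Str.split? query " ").getD []).drop (w1 + 1)) with
    | none => simp [pvSndWhere, hw1, hw2] at hsome
    | some r =>
      obtain ⟨hw1lt, hw1get, hw1min⟩ := List.findIdx?_eq_some_iff_getElem.mp hw1
      obtain ⟨hrlt, hrget, hrmin⟩ := List.findIdx?_eq_some_iff_getElem.mp hw2
      have hw1eq : ((PySem.Str.split? query " ").getD [])[w1] = "where" := by
        exact beq_iff_eq.mp hw1get
      have hreq : (((PySem.Str.split? query " ").getD []).drop (w1 + 1))[r] = "where" := by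
        exact beq_iff_eq.mp hrget
      have hdec2 : ((PySem.Str.split? query " ").getD []).drop (w1 + 1) =
          (((PySem.Str.split? query " ").getD []).drop (w1 + 1)).take r ++ "where" ::
            (((PySem.Str.split? query " ").getD []).drop (w1 + 1)).drop (r + 1) := by
        conv_lhs => rw [← List.take_append_drop r (((PySem.Str.split? query " ").getD []).drop (w1 + 1)),
          List.drop_eq_getElem_cons hrlt]
        rw [hreq]
      have hdecomp : (PySem.Str.split? query " ").getD [] =
          ((PySem.Str.split? query " ").getD []).take w1 ++ "where" ::
            ((((PySem.Str.split? query " ").getD []).drop (w1 + 1)).take r ++ "where" ::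
              (((PySem.Str.split? query " ").getD []).drop (w1 + 1)).drop (r + 1)) := by
        conv_lhs => rw [← List.take_append_drop w1 ((PySem.Str.split? query " ").getD []),
          List.drop_eq_getElem_cons hw1lt]
        rw [hw1eq, ← hdec2]
      have hP : ∀ x ∈ ((PySem.Str.split? query " ").getD []).take w1, x ≠ "where" := by
        intro x hx hxw
        obtain ⟨i, hi, hxe⟩ := List.mem_iff_getElem.mp hx
        have hiw : i < w1 := by
          have h' := hi; simp [List.length_take] at h'; omega
        apply hw1min i hiw
        have hgt : (((PySem.Str.split? query " ").getD []).take w1)[i] =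
            ((PySem.Str.split? query " ").getD [])[i]'(by omega) := List.getElem_take
        rw [← hgt, hxe, hxw]
        simp
      have hM : ∀ x ∈ (((PySem.Str.split? query " ").getD []).drop (w1 + 1)).take r,
          x ≠ "where" := by
        intro x hx hxw
        obtain ⟨i, hi, hxe⟩ := List.mem_iff_getElem.mp hx
        have hiw : i < r := by
          have h' := hi; simp [List.length_take] at h'; omega
        apply hrmin i hiw
        have hgt : ((((PySem.Str.split? query " ").getD []).drop (w1 + 1)).take r)[i] =
            (((PySem.Str.split? query " ").getD []).drop (w1 + 1))[i]'(by omega) :=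
          List.getElem_take
        rw [← hgt, hxe, hxw]
        simp
      have hsnd : pvSndWhere ((PySem.Str.split? query " ").getD []) = some (r + w1 + 1) := by
        simp [pvSndWhere, hw1, hw2]
      rw [hsnd] at hle
      simp only [Option.getD_some] at hle
      have hkk : (pvSegOf pvPredL conditions).length =
          (conditions.filter (fun c => c ≠ "" ∧ c.toList.head? = some 'l')).length := by
        simp [pvSegOf, hfL]
      have hlen2 : (((PySem.Str.split? query " ").getD []).drop (w1 + 1)).length =
          ((PySem.Str.split? query " ").getD []).length - (w1 + 1) := List.length_drop
      have hlenR : ((((PySem.Str.split? query " ").getD []).drop (w1 + 1)).drop (r + 1)).length =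
          (((PySem.Str.split? query " ").getD []).drop (w1 + 1)).length - (r + 1) :=
        List.length_drop
      have hbound : ((((PySem.Str.split? query " ").getD []).drop (w1 + 1)).drop (r + 1)).length + 1 ≤
          (pvSegOf pvPredL conditions).length := by
        rw [hkk]
        omega
      have hSne : pvSegOf pvPredS conditions ≠ [] := by
        apply List.ne_nil_of_length_pos
        have hsl : (pvSegOf pvPredS conditions).length =
            (conditions.filter (fun c => c ≠ "" ∧ c.toList.head? = some 's')).length := by
          simp [pvSegOf, hfS]
        omega
      rw [hdecomp,
        pvGo14_D (pvSegOf pvPredL conditions) (pvSegOf pvPredS conditions)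
          (pvSeg_ne_where pvPredL conditions) _ _ _ hP hM hbound,
        pvSpec14_D (pvSegOf pvPredL conditions) (pvSegOf pvPredS conditions) _ _ _ hP hM]
      exact pvTightCore (pvSegOf pvPredL conditions) (pvSegOf pvPredS conditions) hSne _ _ _
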